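-- pv_equiv track=rewrite | github.com/jpns3334444/scraper | ai-infra/lambda/prompt_builder/app.py | prioritize_images
-- ===== SOURCE A (Python) =====
-- from typing import Any, Dict, List
--
-- def prioritize_images(image_urls: List[str]) -> List[str]:
--     """
--     Prioritize images to show the most important ones first.
--     Prioritizes: exterior (1-2), interior living spaces (5-6), kitchen/bath (3-4), then others.
--
--     Args:
--         image_urls: List of all image URLs
--
--     Returns:
--         List of up to 20 prioritized image URLs
--     """
--     if not image_urls:
--         return []
--
--     # Categorize images based on URL/filename
--     exterior = []
--     living_spaces = []
--     kitchen_bath = []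
--     others = []
--
--     for url in image_urls:
--         filename = url.split('/')[-1].lower()
--
--         if any(kw in filename for kw in ['exterior', 'outside', 'building', 'entrance']):
--             exterior.append(url)
--         elif any(kw in filename for kw in ['living', 'bedroom', 'room']):
--             living_spaces.append(url)
--         elif any(kw in filename for kw in ['kitchen', 'bath', 'toilet', 'dining']):
--             kitchen_bath.append(url)
--         else:
--             others.append(url)
--
--     # Prioritize and limit each category
--     prioritized = (
--         exterior[:2] +           # Max 2 exterior shots
--         living_spaces[:8] +      # Max 8 living spaces
--         kitchen_bath[:4] +       # Max 4 kitchen/bath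
--         others[:6]               # Max 6 others
--     )
--
--     # Return up to 20 images total
--     return prioritized[:20]
-- ===== SOURCE B (Python) =====
-- from typing import List
--
--
-- def _classify(url: str) -> int:
--     """Priority group of a URL: 0=exterior, 1=living, 2=kitchen/bath, 3=other."""
--     filename = url.split('/')[-1].lower()
--     if any(kw in filename for kw in ['exterior', 'outside', 'building', 'entrance']):
--         return 0
--     if any(kw in filename for kw in ['living', 'bedroom', 'room']):
--         return 1
--     if any(kw in filename for kw in ['kitchen', 'bath', 'toilet', 'dining']):
--         return 2
--     return 3
--
--
-- def prioritize_images(image_urls: List[str]) -> List[str]: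
--     picked = (
--         [u for u in image_urls if _classify(u) == 0][:2]
--         + [u for u in image_urls if _classify(u) == 1][:8]
--         + [u for u in image_urls if _classify(u) == 2][:4]
--         + [u for u in image_urls if _classify(u) == 3][:6]
--     )
--     return picked[:20]
-- ===== Notes on version B (the rewrite author's own statement) =====
-- stated objective: alternative
-- what changed: Replaced A's single categorizing pass that grows four mutable buckets with a pure classify(url) helper plus four independent filter-and-cap comprehensions concatenated in priority order.
import Mathlib
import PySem

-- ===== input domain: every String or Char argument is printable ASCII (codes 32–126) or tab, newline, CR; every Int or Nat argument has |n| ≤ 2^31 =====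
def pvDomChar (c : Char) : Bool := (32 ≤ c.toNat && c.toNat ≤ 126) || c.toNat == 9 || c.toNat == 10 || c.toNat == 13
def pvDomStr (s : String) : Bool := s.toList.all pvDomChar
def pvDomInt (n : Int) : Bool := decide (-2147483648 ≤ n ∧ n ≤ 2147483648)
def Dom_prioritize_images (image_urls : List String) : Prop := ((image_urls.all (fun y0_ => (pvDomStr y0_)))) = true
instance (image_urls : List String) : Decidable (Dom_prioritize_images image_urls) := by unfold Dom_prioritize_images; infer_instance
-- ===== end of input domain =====

-- B replaces A's single categorizing pass (four growing buckets) by a classify helper and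
-- four independent filter-and-cap passes concatenated in priority order (objective: alternative).


-- ===== PORT A =====
-- filename = url.split('/')[-1].lower()  (split('/') is never empty, so the [-1] never raises; getD "" is dead)
def pvFilename (url : String) : String :=
  PySem.Str.lower ((PySem.List.pyGet? ((PySem.Str.split? url "/").getD []) (-1)).getD "")

-- any(kw in filename for kw in kws)
def pvAnyKw (kws : List String) (filename : String) : Bool :=
  kws.any (fun kw => PySem.Str.isIn kw filename)

-- the body of A's single categorizing loop (state = the four buckets)
def pvStepA (st : List String × List String × List String × List String) (url : String) :
    List String × List String × List String × List String :=
  let (ex, liv, kb, ot) := st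
  let filename := pvFilename url
  if pvAnyKw ["exterior", "outside", "building", "entrance"] filename then
    (ex ++ [url], liv, kb, ot)
  else if pvAnyKw ["living", "bedroom", "room"] filename then
    (ex, liv ++ [url], kb, ot)
  else if pvAnyKw ["kitchen", "bath", "toilet", "dining"] filename then
    (ex, liv, kb ++ [url], ot)
  else
    (ex, liv, kb, ot ++ [url])

def prioritize_images (image_urls : List String) : List String :=
  if image_urls = [] then []
  else
    let st := image_urls.foldl pvStepA ([], [], [], [])
    let (ex, liv, kb, ot) := st
    let prioritized :=
      PySem.List.slice ex none (some 2) ++ PySem.List.slice liv none (some 8) ++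
      PySem.List.slice kb none (some 4) ++ PySem.List.slice ot none (some 6)
    PySem.List.slice prioritized none (some 20)

-- ===== PORT B =====
-- _classify(url): index of the first matching keyword group, 3 if none
def pvClassify (url : String) : Nat :=
  let filename := pvFilename url
  if pvAnyKw ["exterior", "outside", "building", "entrance"] filename then 0
  else if pvAnyKw ["living", "bedroom", "room"] filename then 1
  else if pvAnyKw ["kitchen", "bath", "toilet", "dining"] filename then 2
  else 3

def prioritize_images_alt (image_urls : List String) : List String :=
  ((image_urls.filter (fun u => pvClassify u == 0)).take 2 ++
   (image_urls.filter (fun u => pvClassify u == 1)).take 8 ++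
   (image_urls.filter (fun u => pvClassify u == 2)).take 4 ++
   (image_urls.filter (fun u => pvClassify u == 3)).take 6).take 20

-- ===== PRECONDITION & SPEC =====
def Spec_prioritize_images (image_urls : List String) (out : List String) : Prop := out = prioritize_images_alt image_urls
instance (image_urls : List String) (out : List String) : Decidable (Spec_prioritize_images image_urls out) := by unfold Spec_prioritize_images; infer_instance

-- ===== CLAIM (what is proved, stated in full; the proofs are below) =====
def Claim_equal_prioritize_images : Prop := ∀ (image_urls : List String), Dom_prioritize_images image_urls → Spec_prioritize_images image_urls (prioritize_images image_urls)

-- ===== LEMMAS AND PROOFS =====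

theorem classify_eq_zero (x : String)
    (h0 : pvAnyKw ["exterior", "outside", "building", "entrance"] (pvFilename x) = true) :
    pvClassify x = 0 := by simp [pvClassify, h0]

theorem classify_eq_one (x : String)
    (h0 : ¬ pvAnyKw ["exterior", "outside", "building", "entrance"] (pvFilename x) = true)
    (h1 : pvAnyKw ["living", "bedroom", "room"] (pvFilename x) = true) :
    pvClassify x = 1 := by simp [pvClassify, h0, h1]

theorem classify_eq_two (x : String)
    (h0 : ¬ pvAnyKw ["exterior", "outside", "building", "entrance"] (pvFilename x) = true)
    (h1 : ¬ pvAnyKw ["living", "bedroom", "room"] (pvFilename x) = true)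
    (h2 : pvAnyKw ["kitchen", "bath", "toilet", "dining"] (pvFilename x) = true) :
    pvClassify x = 2 := by simp [pvClassify, h0, h1, h2]

theorem classify_eq_three (x : String)
    (h0 : ¬ pvAnyKw ["exterior", "outside", "building", "entrance"] (pvFilename x) = true)
    (h1 : ¬ pvAnyKw ["living", "bedroom", "room"] (pvFilename x) = true)
    (h2 : ¬ pvAnyKw ["kitchen", "bath", "toilet", "dining"] (pvFilename x) = true) :
    pvClassify x = 3 := by simp [pvClassify, h0, h1, h2]

-- A's loop leaves in each bucket exactly the urls B's classifier sends to that group, in order.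
theorem foldl_stepA_eq_filters (xs : List String) (e l k o : List String) :
    xs.foldl pvStepA (e, l, k, o) =
      (e ++ xs.filter (fun u => pvClassify u == 0),
       l ++ xs.filter (fun u => pvClassify u == 1),
       k ++ xs.filter (fun u => pvClassify u == 2),
       o ++ xs.filter (fun u => pvClassify u == 3)) := by
  induction xs generalizing e l k o with
  | nil => simp
  | cons x xs ih =>
    simp only [List.foldl_cons, pvStepA]
    split_ifs with h0 h1 h2
    · have hc := classify_eq_zero x h0
      rw [ih]; simp [hc]
    · have hc := classify_eq_one x h0 h1
      rw [ih]; simp [hc]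
    · have hc := classify_eq_two x h0 h1 h2
      rw [ih]; simp [hc]
    · have hc := classify_eq_three x h0 h1 h2
      rw [ih]; simp [hc]

theorem prioritize_images_spec : Claim_equal_prioritize_images := by
  intro xs _
  unfold Spec_prioritize_images prioritize_images prioritize_images_alt
  by_cases h : xs = []
  · simp [h]
  · simp only [h, if_false, foldl_stepA_eq_filters xs [] [] [] [], List.nil_append]
    rw [PySem.List.slice_to _ (by norm_num), PySem.List.slice_to _ (by norm_num),
        PySem.List.slice_to _ (by norm_num), PySem.List.slice_to _ (by norm_num),
        PySem.List.slice_to _ (by norm_num)]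
    rfl
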